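-- pv_equiv track=rewrite | github.com/naman-toshniwal/DSA_Practice | Medium/Number of rectangles in a circle.py | rectanglesInCircle
-- ===== SOURCE A (Python) =====
-- def rectanglesInCircle(r):
--     diameter = 2 * r
--     rectangle_count = 0
--     square_diameter = diameter * diameter
--
--     for l in range(1, diameter):
--         for b in range(1, diameter):
--             diagonal = l * l + b * b
--             if diagonal <= square_diameter:
--                 rectangle_count += 1
--
--     return rectangle_count
-- ===== SOURCE B (Python) =====
-- def rectanglesInCircle(r):
--     # Two-pointer sweep: for each length l, the largest breadth fitting the
--     # diagonal bound is nonincreasing in l, so one shared pointer b suffices.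
--     d = 2 * r
--     total = 0
--     b = d - 1
--     for l in range(1, d):
--         s = d * d - l * l
--         while b > 0 and b * b > s:
--             b -= 1
--         total += b
--     return total
-- ===== Notes on version B (the rewrite author's own statement) =====
-- stated objective: faster
-- what changed: Replaced A's nested loop over all (length, breadth) pairs by a single linear sweep: a shared breadth pointer b, nonincreasing as the length grows, is decremented until b*b fits the diagonal bound, and its value is the per-length count.
import Mathlib
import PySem

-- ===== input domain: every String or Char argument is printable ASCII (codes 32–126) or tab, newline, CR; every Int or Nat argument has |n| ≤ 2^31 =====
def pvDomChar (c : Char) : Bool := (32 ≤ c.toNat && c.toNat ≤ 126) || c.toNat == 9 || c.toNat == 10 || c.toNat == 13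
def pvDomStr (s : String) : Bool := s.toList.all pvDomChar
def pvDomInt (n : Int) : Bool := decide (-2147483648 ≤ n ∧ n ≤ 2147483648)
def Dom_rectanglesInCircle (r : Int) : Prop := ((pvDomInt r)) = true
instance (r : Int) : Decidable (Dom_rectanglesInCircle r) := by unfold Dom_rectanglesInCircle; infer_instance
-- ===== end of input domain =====

-- B replaces A's double loop over lengths and breadths by a single sweep with a
-- shared decreasing breadth pointer (the largest breadth fitting the diagonal
-- bound is nonincreasing in the length); objective: faster.

-- ===== PORT A =====
def rectanglesInCircle (r : Int) : Int :=
  let diameter := 2 * r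
  let squareDiameter := diameter * diameter
  (PySem.List.pyRange 1 diameter 1).foldl (fun rectangleCount l =>
    (PySem.List.pyRange 1 diameter 1).foldl (fun rc b =>
      let diagonal := l * l + b * b
      if diagonal ≤ squareDiameter then rc + 1 else rc) rectangleCount) 0

-- ===== PORT B =====
-- the 'while b > 0 and b * b > s: b -= 1' loop of Source B
def whileDec (b s : Int) : Int :=
  if h : 0 < b ∧ s < b * b then whileDec (b - 1) s else b
termination_by b.toNat
decreasing_by omega

def rectanglesInCircle_alt (r : Int) : Int :=
  let d := 2 * r
  let res := (PySem.List.pyRange 1 d 1).foldl (fun (p : Int × Int) l =>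
      let s := d * d - l * l
      let b := whileDec p.2 s
      (p.1 + b, b)) (0, d - 1)
  res.1

-- ===== PRECONDITION & SPEC =====
def Spec_rectanglesInCircle (r : Int) (out : Int) : Prop := out = rectanglesInCircle_alt r
instance (r : Int) (out : Int) : Decidable (Spec_rectanglesInCircle r out) := by unfold Spec_rectanglesInCircle; infer_instance

-- ===== CLAIM (what is proved, stated in full; the proofs are below) =====
def Claim_equal_rectanglesInCircle : Prop := ∀ (r : Int), Dom_rectanglesInCircle r → Spec_rectanglesInCircle r (rectanglesInCircle r)

-- ===== LEMMAS AND PROOFS =====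

-- per-length count of fitting breadths: floor of the square root of d² − l²
def pvQ (d l : Int) : Int := ((d * d - l * l).toNat.sqrt : Int)

-- A's inner loop over range(1, 1+n) counts the b with b*b ≤ s: min n (isqrt s)
lemma pvCountAux (s : Int) (hs : 0 ≤ s) (c : Int) :
    ∀ (n : Nat) (acc : Int),
      (PySem.List.pyRange 1 (1 + (n : Int)) 1).foldl
        (fun rc b => if c + b * b ≤ c + s then rc + 1 else rc) acc
      = acc + min (n : Int) (s.toNat.sqrt : Int) := by
  intro n
  induction n with
  | zero => intro acc; simp [PySem.List.pyRange_one_eq_nil]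
  | succ n ih =>
    intro acc
    have h1 : (1 : Int) ≤ 1 + (n : Int) := by omega
    have hr : PySem.List.pyRange 1 (1 + ((n + 1 : Nat) : Int)) 1
        = PySem.List.pyRange 1 (1 + (n : Int)) 1 ++ [1 + (n : Int)] := by
      have := PySem.List.pyRange_one_succ_right (a := 1) (b := 1 + (n : Int)) h1
      push_cast
      rw [show (1 : Int) + ((n : Int) + 1) = (1 + (n : Int)) + 1 by ring, this]
    rw [hr, List.foldl_append, ih]
    simp only [List.foldl_cons, List.foldl_nil]
    have hiff : c + (1 + (n : Int)) * (1 + (n : Int)) ≤ c + s ↔ (n + 1 : Nat) ≤ s.toNat.sqrt := by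
      rw [Nat.le_sqrt]
      constructor
      · intro h
        have : ((n + 1) * (n + 1) : Nat) ≤ s.toNat := by
          have h2 : (1 + (n : Int)) * (1 + (n : Int)) ≤ s := by omega
          have : (((n + 1) * (n + 1) : Nat) : Int) ≤ s := by push_cast; linarith
          omega
        exact this
      · intro h
        have : (((n + 1) * (n + 1) : Nat) : Int) ≤ s := by
          have := Int.toNat_of_nonneg hs
          omega
        push_cast at this
        linarith
    split_ifs with h
    · rw [hiff] at h
      have : ((n + 1 : Nat) : Int) ≤ (s.toNat.sqrt : Int) := by exact_mod_cast h
      push_cast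
      omega
    · rw [hiff] at h
      have : (s.toNat.sqrt : Int) ≤ (n : Int) := by
        have : s.toNat.sqrt < n + 1 := by omega
        exact_mod_cast Nat.lt_succ_iff.mp this
      push_cast
      omega

-- A's inner loop for a length l with 1 ≤ l < d adds exactly pvQ d l
lemma pvCountA (d l : Int) (hl : 1 ≤ l) (hld : l < d) (acc : Int) :
    (PySem.List.pyRange 1 d 1).foldl
      (fun rc b => if l * l + b * b ≤ d * d then rc + 1 else rc) acc
    = acc + pvQ d l := by
  have hs : 0 ≤ d * d - l * l := by nlinarith
  have hd1 : (1 : Int) ≤ d := by omega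
  have hdn : d = 1 + (((d - 1).toNat : Nat) : Int) := by omega
  have hdd : d * d = l * l + (d * d - l * l) := by ring
  have key := pvCountAux (d * d - l * l) hs (l * l) (d - 1).toNat acc
  rw [← hdn] at key
  rw [hdd, key]
  have hlt : (d * d - l * l).toNat.sqrt < d.toNat := by
    rw [Nat.sqrt_lt]
    have h1 : d * d - l * l < d * d := by nlinarith
    have hmul : (d * d).toNat = d.toNat * d.toNat := by
      rw [Int.toNat_mul (by omega) (by omega)]
    omega
  have : ((d * d - l * l).toNat.sqrt : Int) ≤ ((d - 1).toNat : Int) := by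
    have := hlt
    omega
  unfold pvQ
  rw [min_eq_right this]

-- the while loop lands exactly on the integer square root
lemma pvWhileDec_eq (s : Int) (hs : 0 ≤ s) :
    ∀ (n : Nat) (b : Int), b = (s.toNat.sqrt : Int) + (n : Int) →
      whileDec b s = (s.toNat.sqrt : Int) := by
  intro n
  induction n with
  | zero =>
    intro b hb
    simp only [Nat.cast_zero, add_zero] at hb
    subst hb
    rw [whileDec, dif_neg]
    rintro ⟨hpos, hlt⟩
    have h2 : s.toNat.sqrt * s.toNat.sqrt ≤ s.toNat := by
      simpa [pow_two] using Nat.sqrt_le' s.toNat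
    have h3 : ((s.toNat.sqrt * s.toNat.sqrt : Nat) : Int) ≤ s := by
      rw [← Int.toNat_of_nonneg hs]
      exact_mod_cast h2
    push_cast at h3
    linarith
  | succ n ih =>
    intro b hb
    have hrec := ih (b - 1) (by push_cast at hb ⊢; omega)
    rw [whileDec, dif_pos, hrec]
    constructor
    · omega
    · have hlt : s.toNat < b.toNat * b.toNat := by
        rw [← Nat.sqrt_lt]
        omega
      have h4 : ((s.toNat : Nat) : Int) < ((b.toNat * b.toNat : Nat) : Int) := by exact_mod_cast hlt
      push_cast at h4
      have hb0 : (0:Int) ≤ b := by omega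
      rw [Int.toNat_of_nonneg hb0] at h4
      omega

lemma pvWhileDec_eq' (s b : Int) (hs : 0 ≤ s) (hb : (s.toNat.sqrt : Int) ≤ b) :
    whileDec b s = (s.toNat.sqrt : Int) := by
  have h : b = (s.toNat.sqrt : Int) + ((b - (s.toNat.sqrt : Int)).toNat : Int) := by omega
  exact pvWhileDec_eq s hs _ b h

lemma pvQ_mono (d lo : Int) (h : 0 ≤ lo) : pvQ d (lo + 1) ≤ pvQ d lo := by
  unfold pvQ
  have h1 : d * d - (lo + 1) * (lo + 1) ≤ d * d - lo * lo := by nlinarith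
  have := Nat.sqrt_le_sqrt (Int.toNat_le_toNat h1)
  exact_mod_cast this

-- B's fold with the shared pointer computes the same per-length sum
lemma pvFoldB (d : Int) :
    ∀ (n : Nat) (lo acc b : Int), lo + (n : Int) = d → 1 ≤ lo → pvQ d lo ≤ b →
      ((PySem.List.pyRange lo d 1).foldl (fun (p : Int × Int) l =>
          let s := d * d - l * l
          let b' := whileDec p.2 s
          (p.1 + b', b')) (acc, b)).1
      = (PySem.List.pyRange lo d 1).foldl (fun a l => a + pvQ d l) acc := by
  intro n
  induction n with
  | zero =>
    intro lo acc b hn _ _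
    rw [PySem.List.pyRange_one_eq_nil (by omega)]
    rfl
  | succ n ih =>
    intro lo acc b hn hlo hb
    have hlt : lo < d := by push_cast at hn; omega
    rw [PySem.List.pyRange_one_cons hlt]
    simp only [List.foldl_cons]
    have hs : 0 ≤ d * d - lo * lo := by nlinarith
    have hw : whileDec b (d * d - lo * lo) = pvQ d lo :=
      pvWhileDec_eq' _ _ hs hb
    rw [hw]
    exact ih (lo + 1) (acc + pvQ d lo) (pvQ d lo) (by push_cast at hn ⊢; omega)
      (by omega) (pvQ_mono d lo (by omega))

-- the two ports agree on every input
lemma pvMain (r : Int) : rectanglesInCircle r = rectanglesInCircle_alt r := by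
  unfold rectanglesInCircle rectanglesInCircle_alt
  simp only []
  set d := 2 * r with hd
  rcases le_or_gt d 1 with hle | hgt
  · rw [PySem.List.pyRange_one_eq_nil (by omega)]
    rfl
  · have hA : (PySem.List.pyRange 1 d 1).foldl (fun rectangleCount l =>
        (PySem.List.pyRange 1 d 1).foldl (fun rc b =>
          if l * l + b * b ≤ d * d then rc + 1 else rc) rectangleCount) 0
        = (PySem.List.pyRange 1 d 1).foldl (fun a l => a + pvQ d l) 0 := by
      refine PySem.List.foldl_congr_mem _ _ _ _ ?_
      intro acc l hl
      rw [PySem.List.mem_pyRange_one] at hl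
      exact pvCountA d l hl.1 hl.2 acc
    rw [hA]
    have hq1 : pvQ d 1 ≤ d - 1 := by
      unfold pvQ
      have hlt : (d * d - 1 * 1).toNat.sqrt < d.toNat := by
        rw [Nat.sqrt_lt]
        have hmul : (d * d).toNat = d.toNat * d.toNat := by
          rw [Int.toNat_mul (by omega) (by omega)]
        have h4 : 4 ≤ d * d := by nlinarith
        omega
      omega
    rw [← pvFoldB d (d - 1).toNat 1 0 (d - 1) (by omega) (by omega) hq1]

-- ===== VERDICT (by name: the statement is the Claim_ definition above) =====
theorem rectanglesInCircle_spec : Claim_equal_rectanglesInCircle := by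
  intro r _
  show rectanglesInCircle r = rectanglesInCircle_alt r
  exact pvMain r
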